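-- pv_equiv track=rewrite | github.com/xiaoshuai155vv/friday | scripts/workflow_smart_recommender.py | _reorder_steps
-- ===== SOURCE A (Python) =====
-- from typing import List, Dict, Any, Optional
--
-- def _reorder_steps(steps: List[Dict]) -> List[Dict]:
--     """重排独立步骤"""
--     # 简单策略：wait 步骤可以移到前面
--     wait_steps = [s for s in steps if s.get('action') == 'wait']
--     other_steps = [s for s in steps if s.get('action') != 'wait']
--
--     # 保留原有顺序，只移动 wait
--     result = []
--     for step in steps:
--         if step.get('action') != 'wait':
--             result.append(step)
--
--     # 在最后添加 wait 步骤
--     result.extend(wait_steps)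
--
--     return result
-- ===== SOURCE B (Python) =====
-- from typing import List, Dict
--
-- def _reorder_steps(steps: List[Dict]) -> List[Dict]:
--     """Stable sort on a boolean key: non-wait first (False), wait last (True)."""
--     return sorted(steps, key=lambda s: s.get('action') == 'wait')
-- ===== Notes on version B (the rewrite author's own statement) =====
-- stated objective: idiomatic
-- what changed: Replaced the two filter passes plus an explicit accumulation loop and extend with a single stable sort keyed on the boolean 'is wait step', relying on sort stability to preserve relative order.
import Mathlib
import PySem

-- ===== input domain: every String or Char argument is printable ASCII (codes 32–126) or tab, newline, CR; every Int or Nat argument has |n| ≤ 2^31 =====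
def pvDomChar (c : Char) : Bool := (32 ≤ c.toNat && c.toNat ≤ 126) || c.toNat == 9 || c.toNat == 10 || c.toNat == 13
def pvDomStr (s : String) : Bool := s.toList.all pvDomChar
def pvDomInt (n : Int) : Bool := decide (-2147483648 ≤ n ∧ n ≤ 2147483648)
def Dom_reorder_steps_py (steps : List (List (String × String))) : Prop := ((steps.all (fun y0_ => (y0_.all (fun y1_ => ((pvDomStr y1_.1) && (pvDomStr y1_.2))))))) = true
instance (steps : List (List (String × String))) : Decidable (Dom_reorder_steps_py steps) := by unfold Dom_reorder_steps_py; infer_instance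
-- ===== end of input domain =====

-- B replaces A's two filter passes + accumulation loop with one stable sort on the boolean key "is wait step" (idiomatic; same result proved below).


-- ===== PORT A =====
-- s.get('action') == 'wait'  (None ≠ 'wait' when the key is absent)
def pvIsWait (s : List (String × String)) : Bool := (PySem.Dict.mk s).get? "action" == some "wait"

def reorder_steps_py (steps : List (List (String × String))) : List (List (String × String)) :=
  let wait_steps := steps.filter (fun s => pvIsWait s)
  let _other_steps := steps.filter (fun s => !pvIsWait s)
  let result : List (List (String × String)) := []
  let result := steps.foldl (fun result step => if !pvIsWait step then result ++ [step] else result) result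
  result ++ wait_steps

-- ===== PORT B =====
-- sorted(steps, key=lambda s: s.get('action') == 'wait') ; Python bools sort as 0/1
def reorder_steps_py_alt (steps : List (List (String × String))) : List (List (String × String)) :=
  PySem.List.sorted steps (fun s => if pvIsWait s then (1 : Nat) else 0)

-- ===== PRECONDITION & SPEC =====
def Spec_reorder_steps_py (steps : List (List (String × String))) (out : List (List (String × String))) : Prop := out = reorder_steps_py_alt steps
instance (steps : List (List (String × String))) (out : List (List (String × String))) : Decidable (Spec_reorder_steps_py steps out) := by unfold Spec_reorder_steps_py; infer_instance

-- ===== CLAIM (what is proved, stated in full; the proofs are below) =====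
def Claim_equal_reorder_steps_py : Prop := ∀ (steps : List (List (String × String))), Dom_reorder_steps_py steps → Spec_reorder_steps_py steps (reorder_steps_py steps)

-- ===== LEMMAS AND PROOFS =====

-- Inserting an element whose boolean key is false passes all key-false elements of A
-- and lands in front of the key-true block B.
theorem pv_insertBy_front {α : Type} (before : α → α → Bool) (x : α) (B : List α)
    (hB : ∀ b ∈ B, before x b = true) :
    PySem.List.insertBy before x B = x :: B := by
  cases B with
  | nil => simp [PySem.List.insertBy]
  | cons b t => simp [PySem.List.insertBy, hB b (List.mem_cons_self ..)]

theorem pv_insertBy_skip {α : Type} (before : α → α → Bool) (x : α) (A B : List α)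
    (hA : ∀ a ∈ A, before x a = false) :
    PySem.List.insertBy before x (A ++ B) = A ++ PySem.List.insertBy before x B := by
  induction A with
  | nil => simp
  | cons a t ih =>
      simp [PySem.List.insertBy, hA a (List.mem_cons_self ..),
        ih (fun a ha => hA a (List.mem_cons_of_mem _ ha))]

-- Stable insertion sort with a 0/1 key is exactly the partition: key-0 block then key-1 block.
theorem pv_foldl_ins_part {α : Type} (p : α → Bool) (xs A B : List α)
    (hA : ∀ a ∈ A, p a = false) (hB : ∀ b ∈ B, p b = true) :
    xs.foldl (fun acc x =>
        PySem.List.insertBy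
          (fun a b => decide ((if p a then (1 : Nat) else 0) < (if p b then (1 : Nat) else 0))) x acc)
      (A ++ B)
    = (A ++ xs.filter (fun x => !p x)) ++ (B ++ xs.filter p) := by
  induction xs generalizing A B with
  | nil => simp
  | cons x t ih =>
      by_cases hx : p x = true
      · have h1 : PySem.List.insertBy
            (fun a b => decide ((if p a then (1 : Nat) else 0) < (if p b then (1 : Nat) else 0))) x (A ++ B)
            = (A ++ B) ++ [x] := by
          apply PySem.List.insertBy_of_forall_not_before
          intro y hy
          rcases List.mem_append.mp hy with h | h
          · simp [hx, hA y h]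
          · simp [hx, hB y h]
        have h2 := ih A (B ++ [x]) hA (by
          intro b hb
          rcases List.mem_append.mp hb with h | h
          · exact hB b h
          · simp at h; simpa [h] using hx)
        simp only [List.foldl_cons, h1]
        rw [show (A ++ B) ++ [x] = A ++ (B ++ [x]) by simp, h2]
        simp [hx]
      · have hx' : p x = false := by simpa using hx
        have h1 : PySem.List.insertBy
            (fun a b => decide ((if p a then (1 : Nat) else 0) < (if p b then (1 : Nat) else 0))) x (A ++ B)
            = (A ++ [x]) ++ B := by
          rw [pv_insertBy_skip _ _ A B (by intro a ha; simp [hx', hA a ha])]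
          rw [pv_insertBy_front _ _ B (by intro b hb; simp [hx', hB b hb])]
          simp
        have h2 := ih (A ++ [x]) B (by
          intro a ha
          rcases List.mem_append.mp ha with h | h
          · exact hA a h
          · simp at h; simpa [h] using hx') hB
        simp only [List.foldl_cons, h1, h2]
        simp [hx']

-- ===== VERDICT (by name: the statement is the Claim_ definition above) =====
theorem reorder_steps_py_spec : Claim_equal_reorder_steps_py := by
  intro steps _
  show reorder_steps_py steps = reorder_steps_py_alt steps
  unfold reorder_steps_py reorder_steps_py_alt
  rw [PySem.List.sorted_eq_foldl_insertBy]
  have h := pv_foldl_ins_part pvIsWait steps [] [] (by simp) (by simp)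
  simp only [List.nil_append] at h
  rw [h]
  have := PySem.List.foldl_append_if (fun s => !pvIsWait s) (fun s => s) steps []
  simp only [List.nil_append, List.map_id'] at this
  simpa using this
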